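-- pv_equiv track=rewrite | github.com/piriyaponk/alphaabsolute | scripts/paper_trading/focus_list.py | _parse_lessons
-- ===== SOURCE A (Python) =====
-- def _parse_lessons(text: str) -> list:
--     lessons, current = [], {}
--     for line in text.splitlines():
--         line = line.strip()
--         if line.upper().startswith("LESSON:"):
--             if current:
--                 lessons.append(current)
--             current = {"lesson": line[7:].strip(), "evidence": "", "action": ""}
--         elif line.upper().startswith("EVIDENCE:") and current:
--             current["evidence"] = line[9:].strip()
--         elif line.upper().startswith("ACTION:") and current:
--             current["action"] = line[7:].strip()
--     if current:
--         lessons.append(current)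
--     return lessons
-- ===== SOURCE B (Python) =====
-- def _parse_lessons(text: str) -> list:
--     lines = [ln.strip() for ln in text.splitlines()]
--     # segment: a new group starts at every line whose uppercase form begins with "LESSON:";
--     # lines before the first such marker are ignored
--     while lines and not lines[0].upper().startswith("LESSON:"):
--         lines.pop(0)
--     out = []
--     while lines:
--         head = lines.pop(0)
--         body = []
--         while lines and not lines[0].upper().startswith("LESSON:"):
--             body.append(lines.pop(0))
--         evidence = next((ln[9:].strip() for ln in reversed(body)
--                          if ln.upper().startswith("EVIDENCE:")), "")
--         action = next((ln[7:].strip() for ln in reversed(body)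
--                        if ln.upper().startswith("ACTION:")), "")
--         out.append({"lesson": head[7:].strip(), "evidence": evidence, "action": action})
--     return out
-- ===== Notes on version B (the rewrite author's own statement) =====
-- stated objective: alternative
-- what changed: A is a one-pass state machine that updates a running record dict line by line; B first segments the stripped lines into LESSON-delimited groups (dropping lines before the first marker) and then builds each record independently, taking the lesson from the group's head and evidence/action by a reverse search (last match wins) over the group's body.
import Mathlib
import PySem

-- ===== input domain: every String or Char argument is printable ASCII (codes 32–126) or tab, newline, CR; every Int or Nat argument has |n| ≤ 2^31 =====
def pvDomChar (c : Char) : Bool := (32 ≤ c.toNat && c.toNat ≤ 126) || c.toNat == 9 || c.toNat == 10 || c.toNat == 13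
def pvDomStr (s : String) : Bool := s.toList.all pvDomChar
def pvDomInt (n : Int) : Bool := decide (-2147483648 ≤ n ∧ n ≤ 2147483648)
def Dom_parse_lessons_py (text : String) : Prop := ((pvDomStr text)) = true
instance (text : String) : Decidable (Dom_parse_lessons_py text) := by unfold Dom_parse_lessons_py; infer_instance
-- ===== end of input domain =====

-- B replaces A's one-pass state machine by a segment-then-scan decomposition (split the
-- lines into LESSON-delimited groups, then fill each record by a reverse search); objective:
-- alternative decomposition, same cost.

-- ===== PORT A =====
-- shared trivial abbreviations of the Python tests/slices (used verbatim by both ports)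
def pyIsLesson (l : String) : Bool := PySem.Str.startswith (PySem.Str.upper l) "LESSON:"
def pyIsEvidence (l : String) : Bool := PySem.Str.startswith (PySem.Str.upper l) "EVIDENCE:"
def pyIsAction (l : String) : Bool := PySem.Str.startswith (PySem.Str.upper l) "ACTION:"
def pyTail (n : Int) (l : String) : String := PySem.Str.strip (PySem.Str.slice l (some n) none)

-- 'if current: lessons.append(current)' (A performs this both in the LESSON branch and at the end)
def finA (st : List (List (String × String)) × PySem.Dict String String) :
    List (List (String × String)) :=
  if st.2.items.isEmpty then st.1 else st.1 ++ [st.2.items]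

-- the body of A's for-loop
def pyStepA (st : List (List (String × String)) × PySem.Dict String String) (line0 : String) :
    List (List (String × String)) × PySem.Dict String String :=
  let line := PySem.Str.strip line0
  if pyIsLesson line then
    (finA st,
     ((PySem.Dict.empty.insert "lesson" (pyTail 7 line)).insert "evidence" "").insert "action" "")
  else if pyIsEvidence line && !st.2.items.isEmpty then
    (st.1, st.2.insert "evidence" (pyTail 9 line))
  else if pyIsAction line && !st.2.items.isEmpty then
    (st.1, st.2.insert "action" (pyTail 7 line))
  else
    (st.1, st.2)

def parse_lessons_py (text : String) : List (List (String × String)) :=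
  finA ((PySem.Str.splitlines text).foldl pyStepA ([], PySem.Dict.empty))

-- ===== PORT B =====
-- one record: lesson from the group's head line, evidence/action by reverse search in the body
def altRecord (head : String) (body : List String) : List (String × String) :=
  let evidence := ((body.reverse.find? pyIsEvidence).map (pyTail 9)).getD ""
  let action := ((body.reverse.find? pyIsAction).map (pyTail 7)).getD ""
  [("lesson", pyTail 7 head), ("evidence", evidence), ("action", action)]

-- B's outer while-loop: pop a head line, pop the body up to the next LESSON marker, recurse
def altGroups : List String → List (List (String × String))
  | [] => []
  | h :: t =>
    altRecord h (t.takeWhile (fun x => !pyIsLesson x))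
      :: altGroups (t.dropWhile (fun x => !pyIsLesson x))
termination_by l => l.length
decreasing_by
  exact Nat.lt_succ_of_le (List.length_dropWhile_le _ _)

def parse_lessons_py_alt (text : String) : List (List (String × String)) :=
  altGroups (((PySem.Str.splitlines text).map PySem.Str.strip).dropWhile (fun x => !pyIsLesson x))

-- ===== PRECONDITION & SPEC =====
def Spec_parse_lessons_py (text : String) (out : List (List (String × String))) : Prop := out = parse_lessons_py_alt text
instance (text : String) (out : List (List (String × String))) : Decidable (Spec_parse_lessons_py text out) := by unfold Spec_parse_lessons_py; infer_instance

-- ===== CLAIM (what is proved, stated in full; the proofs are below) =====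
def Claim_equal_parse_lessons_py : Prop := ∀ (text : String), Dom_parse_lessons_py text → Spec_parse_lessons_py text (parse_lessons_py text)

-- ===== LEMMAS AND PROOFS =====

-- A's current dict always has exactly this shape once a LESSON line has been seen
def mkD (l e a : String) : PySem.Dict String String :=
  PySem.Dict.mk [("lesson", l), ("evidence", e), ("action", a)]

-- 'last matching line wins, default d' as computed by B's reverse search
def lastDef (p : String → Bool) (f : String → String) (body : List String) (d : String) : String :=
  ((body.reverse.find? p).map f).getD d

theorem mkD_build (x : String) :
    ((PySem.Dict.empty.insert "lesson" x).insert "evidence" "").insert "action" "" = mkD x "" "" := by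
  rfl

theorem not_isAction_of_isEvidence (l : String) (h : pyIsEvidence l = true) :
    pyIsAction l = false := by
  unfold pyIsEvidence at h
  unfold pyIsAction
  rw [PySem.Str.startswith_eq] at h ⊢
  rw [PySem.Chars.startswith_iff] at h
  by_contra hb
  rw [Bool.not_eq_false, PySem.Chars.startswith_iff] at hb
  rcases h with ⟨t1, e1⟩
  rcases hb with ⟨t2, e2⟩
  rw [← e1] at e2
  simp at e2

theorem lastDef_cons (p : String → Bool) (f : String → String) (x : String) (xs : List String)
    (d : String) : lastDef p f (x :: xs) d = lastDef p f xs (if p x then f x else d) := by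
  unfold lastDef
  rw [List.reverse_cons, List.find?_append]
  cases h : xs.reverse.find? p with
  | some y => simp
  | none =>
    simp
    cases hx : p x <;> simp

theorem altGroups_cons (h : String) (t : List String) :
    altGroups (h :: t) =
      altRecord h (t.takeWhile (fun x => !pyIsLesson x))
        :: altGroups (t.dropWhile (fun x => !pyIsLesson x)) := by
  rw [altGroups]

theorem altRecord_eq (h : String) (body : List String) :
    altRecord h body =
      [("lesson", pyTail 7 h), ("evidence", lastDef pyIsEvidence (pyTail 9) body ""),
       ("action", lastDef pyIsAction (pyTail 7) body "")] := by
  rfl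

theorem runA (ls : List String) (acc : List (List (String × String))) (l e a : String) :
    finA (ls.foldl pyStepA (acc, mkD l e a)) =
      acc ++
        ([("lesson", l),
          ("evidence", lastDef pyIsEvidence (pyTail 9)
            ((ls.map PySem.Str.strip).takeWhile (fun x => !pyIsLesson x)) e),
          ("action", lastDef pyIsAction (pyTail 7)
            ((ls.map PySem.Str.strip).takeWhile (fun x => !pyIsLesson x)) a)]
          :: altGroups ((ls.map PySem.Str.strip).dropWhile (fun x => !pyIsLesson x))) := by
  induction ls generalizing acc l e a with
  | nil => simp [finA, mkD, lastDef, altGroups]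
  | cons m ls ih =>
    simp only [List.foldl_cons, List.map_cons]
    by_cases hL : pyIsLesson (PySem.Str.strip m) = true
    · have hstep : pyStepA (acc, mkD l e a) m =
          (acc ++ [(mkD l e a).items], mkD (pyTail 7 (PySem.Str.strip m)) "" "") := by
        simp [pyStepA, hL, finA, mkD, mkD_build]
      rw [hstep, ih]
      rw [List.takeWhile_cons_of_neg (by simp [hL]), List.dropWhile_cons_of_neg (by simp [hL])]
      rw [altGroups_cons, altRecord_eq]
      simp [mkD, lastDef]
    · rw [Bool.not_eq_true] at hL
      rw [List.takeWhile_cons_of_pos (by simp [hL]), List.dropWhile_cons_of_pos (by simp [hL])]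
      by_cases hE : pyIsEvidence (PySem.Str.strip m) = true
      · have hstep : pyStepA (acc, mkD l e a) m =
            (acc, mkD l (pyTail 9 (PySem.Str.strip m)) a) := by
          simp [pyStepA, hL, hE, mkD, PySem.Dict.insert, PySem.Dict.contains]
        rw [hstep, ih, lastDef_cons, lastDef_cons]
        simp [hE, not_isAction_of_isEvidence _ hE]
      · rw [Bool.not_eq_true] at hE
        by_cases hA : pyIsAction (PySem.Str.strip m) = true
        · have hstep : pyStepA (acc, mkD l e a) m =
              (acc, mkD l e (pyTail 7 (PySem.Str.strip m))) := by
            simp [pyStepA, hL, hE, hA, mkD, PySem.Dict.insert, PySem.Dict.contains]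
          rw [hstep, ih, lastDef_cons, lastDef_cons]
          simp [hE, hA]
        · rw [Bool.not_eq_true] at hA
          have hstep : pyStepA (acc, mkD l e a) m = (acc, mkD l e a) := by
            simp [pyStepA, hL, hE, hA]
          rw [hstep, ih, lastDef_cons, lastDef_cons]
          simp [hE, hA]

theorem topA (ls : List String) :
    finA (ls.foldl pyStepA ([], PySem.Dict.empty)) =
      altGroups ((ls.map PySem.Str.strip).dropWhile (fun x => !pyIsLesson x)) := by
  induction ls with
  | nil => simp [finA, altGroups, PySem.Dict.empty]
  | cons m ls ih =>
    simp only [List.foldl_cons, List.map_cons]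
    by_cases hL : pyIsLesson (PySem.Str.strip m) = true
    · have hstep : pyStepA ([], PySem.Dict.empty) m =
          ([], mkD (pyTail 7 (PySem.Str.strip m)) "" "") := by
        simp [pyStepA, hL, finA, PySem.Dict.empty]
        rfl
      rw [hstep, runA]
      rw [List.dropWhile_cons_of_neg (by simp [hL])]
      rw [altGroups_cons, altRecord_eq]
      simp
    · rw [Bool.not_eq_true] at hL
      have hstep : pyStepA ([], PySem.Dict.empty) m = ([], PySem.Dict.empty) := by
        simp [pyStepA, hL, PySem.Dict.empty]
      rw [hstep, ih, List.dropWhile_cons_of_pos (by simp [hL])]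

-- ===== VERDICT (by name: the statement is the Claim_ definition above) =====
theorem parse_lessons_py_spec : Claim_equal_parse_lessons_py := by
  intro text _
  unfold Spec_parse_lessons_py parse_lessons_py parse_lessons_py_alt
  exact topA (PySem.Str.splitlines text)
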